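-- pv_equiv track=rewrite | github.com/SJWallace/AdventOfCode2024 | Day4.py | extract_diagonals
-- ===== SOURCE A (Python) =====
-- def extract_diagonals(matrix):
-- 	"""
--     Extracts all diagonals (both directions) from a 2D matrix and concatenates their characters into strings.
--
--     :param matrix: List of Lists representing the 2D matrix
--     :return: A list of strings, each representing a diagonal
--     """
-- 	rows = len(matrix)
-- 	cols = len(matrix[0])
--
-- 	diagonals = []
--
-- 	# Collect all top-left to bottom-right (\) diagonals
-- 	for d in range(rows + cols - 1):
-- 		diagonal = []
-- 		for row in range(rows):
-- 			col = d - row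
-- 			if 0 <= col < cols:
-- 				diagonal.append(matrix[row][col])
-- 		if diagonal:
-- 			diagonals.append("".join(diagonal))
--
-- 	# Collect all top-right to bottom-left (/) diagonals
-- 	for d in range(-cols + 1, rows):
-- 		diagonal = []
-- 		for row in range(rows):
-- 			col = row - d
-- 			if 0 <= col < cols:
-- 				diagonal.append(matrix[row][col])
-- 		if diagonal:
-- 			diagonals.append("".join(diagonal))
--
-- 	return diagonals
-- ===== SOURCE B (Python) =====
-- def extract_diagonals(matrix):
--     cols = len(matrix[0])
--     back = {}
--     fwd = {}
--     for r, row in enumerate(matrix):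
--         for c, x in enumerate(row[:cols]):
--             back.setdefault(r + c, []).append(x)
--             fwd.setdefault(r - c, []).append(x)
--     return ["".join(back[d]) for d in sorted(back)] + ["".join(fwd[d]) for d in sorted(fwd)]
-- ===== Notes on version B (the rewrite author's own statement) =====
-- stated objective: alternative
-- what changed: B makes a single pass over the matrix bucketing each cell into its r+c and r-c diagonal via two dictionaries (then emits the buckets in sorted key order), instead of A's per-diagonal rescans of every row for each of the rows+cols-1 diagonals in both directions.
import Mathlib
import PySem

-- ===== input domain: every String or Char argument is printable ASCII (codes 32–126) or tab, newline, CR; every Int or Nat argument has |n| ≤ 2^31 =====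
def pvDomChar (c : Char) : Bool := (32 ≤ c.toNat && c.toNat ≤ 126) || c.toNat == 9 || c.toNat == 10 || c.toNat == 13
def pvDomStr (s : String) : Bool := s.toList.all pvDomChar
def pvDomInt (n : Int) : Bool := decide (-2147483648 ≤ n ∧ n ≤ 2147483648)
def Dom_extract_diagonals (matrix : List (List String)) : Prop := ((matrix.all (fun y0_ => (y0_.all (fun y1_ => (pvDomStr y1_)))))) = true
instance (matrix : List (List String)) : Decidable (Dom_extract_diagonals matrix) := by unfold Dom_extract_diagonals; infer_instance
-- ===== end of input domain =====

-- B buckets every cell into its r+c and r-c diagonal in one pass over the matrix instead of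
-- A's per-diagonal rescans of all rows for each of the rows+cols-1 diagonals in both directions.

-- ===== PORT A =====
def extract_diagonals (matrix : List (List String)) : List String :=
  let rows : Int := matrix.length
  let cols : Int := (PySem.List.pyGetD matrix 0 []).length
  let diagonals : List String :=
    (PySem.List.pyRange 0 (rows + cols - 1) 1).foldl (fun diagonals d =>
      let diagonal : List String :=
        (PySem.List.pyRange 0 rows 1).foldl (fun diagonal row =>
          let col := d - row
          if 0 ≤ col ∧ col < cols then
            diagonal ++ [PySem.List.pyGetD (PySem.List.pyGetD matrix row []) col ""]
          else diagonal) []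
      if diagonal ≠ [] then diagonals ++ [PySem.Str.join "" diagonal] else diagonals) []
  (PySem.List.pyRange (-cols + 1) rows 1).foldl (fun diagonals d =>
      let diagonal : List String :=
        (PySem.List.pyRange 0 rows 1).foldl (fun diagonal row =>
          let col := row - d
          if 0 ≤ col ∧ col < cols then
            diagonal ++ [PySem.List.pyGetD (PySem.List.pyGetD matrix row []) col ""]
          else diagonal) []
      if diagonal ≠ [] then diagonals ++ [PySem.Str.join "" diagonal] else diagonals) diagonals

-- ===== PORT B =====
def extract_diagonals_alt (matrix : List (List String)) : List String :=
  let cols : Int := (PySem.List.pyGetD matrix 0 []).length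
  let bf : PySem.Dict Int (List String) × PySem.Dict Int (List String) :=
    (PySem.List.enumerate matrix).foldl (fun bf rr =>
      (PySem.List.enumerate (PySem.List.slice rr.2 none (some cols))).foldl (fun bf cx =>
        (bf.1.modify (rr.1 + cx.1) [] (· ++ [cx.2]),
         bf.2.modify (rr.1 - cx.1) [] (· ++ [cx.2]))) bf)
      (PySem.Dict.empty, PySem.Dict.empty)
  (PySem.List.sorted bf.1.keys (fun d => d)).map (fun q => PySem.Str.join "" (bf.1.getD q [])) ++
  (PySem.List.sorted bf.2.keys (fun d => d)).map (fun q => PySem.Str.join "" (bf.2.getD q []))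

-- ===== PRECONDITION & SPEC =====
-- Pre_ excludes exactly the inputs where A raises IndexError: the empty matrix (matrix[0]),
-- and matrices with some row shorter than the first row (matrix[row][col] with col < cols).
def Pre_extract_diagonals (matrix : List (List String)) : Prop :=
  matrix ≠ [] ∧ ∀ row ∈ matrix, (matrix.headD []).length ≤ row.length
instance (matrix : List (List String)) : Decidable (Pre_extract_diagonals matrix) := by
  unfold Pre_extract_diagonals; infer_instance
def pvWitness_extract_diagonals : List (List String) := [["a", "b"], ["c", "d"]]

def Spec_extract_diagonals (matrix : List (List String)) (out : List String) : Prop := out = extract_diagonals_alt matrix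
instance (matrix : List (List String)) (out : List String) : Decidable (Spec_extract_diagonals matrix out) := by unfold Spec_extract_diagonals; infer_instance

-- ===== CLAIM (what is proved, stated in full; the proofs are below) =====
def Claim_equal_extract_diagonals : Prop := ∀ (matrix : List (List String)), Dom_extract_diagonals matrix → Pre_extract_diagonals matrix → Spec_extract_diagonals matrix (extract_diagonals matrix)

-- ===== LEMMAS AND PROOFS =====

-- the key of a cell (r, (c, x)) on a diagonal: r + c for "\" diagonals, r - c for "/" diagonals
def pvKey (k : Int → Int → Int) (t : Int × Int × String) : Int := k t.1 t.2.1

-- all cells (r, (c, x)) of the matrix in row-major order, columns cut at `cols`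
def pvCells (cols : Nat) (rows : List (List String)) (s : Int) : List (Int × Int × String) :=
  (PySem.List.enumerate rows s).flatMap (fun rr =>
    (PySem.List.enumerate (rr.2.take cols)).map (fun cx => (rr.1, cx)))

-- A's inner loop as a filter/map over the row range
def pvDiag (m : List (List String)) (cols : Nat) (inv : Int → Int → Int) (d : Int) : List String :=
  ((PySem.List.pyRange 0 (m.length : Int) 1).filter
      (fun row => decide (0 ≤ inv d row ∧ inv d row < (cols : Int)))).map
    (fun row => PySem.List.pyGetD (PySem.List.pyGetD m row []) (inv d row) "")

lemma pvCellsNil (cols : Nat) (s : Int) : pvCells cols [] s = [] := by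
  simp [pvCells, PySem.List.enumerate_nil]

lemma pvCellsCons (cols : Nat) (row : List String) (rows : List (List String)) (s : Int) :
    pvCells cols (row :: rows) s =
      ((PySem.List.enumerate (row.take cols)).map (fun cx => (s, cx))) ++ pvCells cols rows (s + 1) := by
  simp [pvCells, PySem.List.enumerate_cons]

lemma pvCellsZero (m : List (List String)) (s : Int) : pvCells 0 m s = [] := by
  induction m generalizing s with
  | nil => exact pvCellsNil 0 s
  | cons row rows ih => rw [pvCellsCons]; simp [PySem.List.enumerate_nil, ih]

-- the elements of enumerate carrying a given index
lemma pvEnumFilter {α : Type} (dl : α) (xs : List α) (s q : Int) :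
    (PySem.List.enumerate xs s).filter (fun p => p.1 == q) =
    if s ≤ q ∧ q < s + (xs.length : Int) then [(q, xs.getD (q - s).toNat dl)] else [] := by
  induction xs generalizing s with
  | nil =>
    rw [PySem.List.enumerate_nil, List.filter_nil,
        if_neg (by simp only [List.length_nil]; omega)]
  | cons x xs ih =>
    rw [PySem.List.enumerate_cons, List.filter_cons, ih (s + 1)]
    simp only [List.length_cons]
    by_cases h : s = q
    · subst h
      rw [if_pos (show ((s, x).1 == s) = true by simp),
          if_neg (show ¬(s + 1 ≤ s ∧ s < s + 1 + (xs.length : Int)) by omega),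
          if_pos (show s ≤ s ∧ s < s + ((xs.length + 1 : Nat) : Int) by omega)]
      simp
    · rw [if_neg (show ¬(((s, x).1 == q) = true) by simp [h])]
      by_cases h2 : s + 1 ≤ q ∧ q < s + 1 + (xs.length : Int)
      · rw [if_pos h2, if_pos (show s ≤ q ∧ q < s + ((xs.length + 1 : Nat) : Int) by omega)]
        have hn : (q - s).toNat = (q - (s + 1)).toNat + 1 := by omega
        rw [hn, List.getD_cons_succ]
      · rw [if_neg h2, if_neg (show ¬(s ≤ q ∧ q < s + ((xs.length + 1 : Nat) : Int)) by omega)]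

-- one row's contribution to the bucket of diagonal d
lemma pvRowBucket (k inv : Int → Int → Int) (hk : ∀ r c d : Int, k r c = d ↔ c = inv d r)
    (cols : Nat) (s d : Int) (row : List String) (hlen : cols ≤ row.length) :
    ((((PySem.List.enumerate (row.take cols)).map (fun cx => (s, cx))).filter
        (fun t => pvKey k t == d)).map (fun t => t.2.2)) =
    (if 0 ≤ inv d s ∧ inv d s < (cols : Int) then [PySem.List.pyGetD row (inv d s) ""] else []) := by
  rw [List.filter_map, List.map_map]
  have hpred : ((fun t => pvKey k t == d) ∘ (fun cx : Int × String => (s, cx))) =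
      (fun p : Int × String => p.1 == inv d s) := by
    funext cx
    simp only [Function.comp_apply, pvKey]
    rw [Bool.eq_iff_iff, beq_iff_eq, beq_iff_eq]
    exact hk s cx.1 d
  rw [hpred, pvEnumFilter "" (row.take cols) 0 (inv d s)]
  have hlen2 : (row.take cols).length = cols := by rw [List.length_take]; omega
  by_cases h : 0 ≤ inv d s ∧ inv d s < (cols : Int)
  · rw [if_pos (by rw [hlen2]; constructor <;> omega), if_pos h, List.map_cons, List.map_nil]
    simp only [Function.comp_apply, sub_zero]
    rw [List.getD_eq_getElem _ _ (by rw [hlen2]; omega), List.getElem_take,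
        PySem.List.pyGetD_eq_getElem row "" h.1 (by omega)]
  · rw [if_neg (by rw [hlen2]; omega), if_neg h, List.map_nil]

-- the elements of diagonal d, collected from the cell list, row by row
lemma pvBucket (k inv : Int → Int → Int) (hk : ∀ r c d : Int, k r c = d ↔ c = inv d r)
    (cols : Nat) :
    ∀ (rows : List (List String)), (∀ row ∈ rows, cols ≤ row.length) → ∀ (s d : Int),
    ((pvCells cols rows s).filter (fun t => pvKey k t == d)).map (fun t => t.2.2) =
    ((PySem.List.enumerate rows s).filter
        (fun rr => decide (0 ≤ inv d rr.1 ∧ inv d rr.1 < (cols : Int)))).map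
      (fun rr => PySem.List.pyGetD rr.2 (inv d rr.1) "") := by
  intro rows
  induction rows with
  | nil => intro _ s d; rw [pvCellsNil, PySem.List.enumerate_nil]; rfl
  | cons row rows ih =>
    intro hlen s d
    have hrow := hlen row (by simp)
    have hrest : ∀ r ∈ rows, cols ≤ r.length := fun r hr => hlen r (List.mem_cons_of_mem _ hr)
    rw [pvCellsCons, PySem.List.enumerate_cons, List.filter_append, List.map_append,
        pvRowBucket k inv hk cols s d row hrow, List.filter_cons, ih hrest (s + 1) d]
    by_cases h : 0 ≤ inv d s ∧ inv d s < (cols : Int)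
    · rw [if_pos h, if_pos (by simp only [decide_eq_true_eq]; exact h), List.map_cons,
          List.singleton_append]
    · rw [if_neg h, if_neg (by simp only [decide_eq_true_eq]; exact h), List.nil_append]

-- A's inner loop over the row range is the same filter/map over enumerate(matrix)
lemma pvInnerEnum (m : List (List String)) (inv : Int → Int → Int) (cols d : Int) :
    ((PySem.List.enumerate m).filter
        (fun rr => decide (0 ≤ inv d rr.1 ∧ inv d rr.1 < cols))).map
      (fun rr => PySem.List.pyGetD rr.2 (inv d rr.1) "") =
    ((PySem.List.pyRange 0 (m.length : Int) 1).filter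
        (fun j => decide (0 ≤ inv d j ∧ inv d j < cols))).map
      (fun j => PySem.List.pyGetD (PySem.List.pyGetD m j []) (inv d j) "") := by
  rw [PySem.List.enumerate_eq_map_pyRange m [], List.filter_map, List.map_map, PySem.List.len_eq]
  rfl

lemma pvDiagEq (k inv : Int → Int → Int) (hk : ∀ r c d : Int, k r c = d ↔ c = inv d r)
    (cols : Nat) (m : List (List String)) (hlen : ∀ row ∈ m, cols ≤ row.length) (d : Int) :
    pvDiag m cols inv d = ((pvCells cols m 0).filter (fun t => pvKey k t == d)).map (fun t => t.2.2) := by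
  rw [pvBucket k inv hk cols m hlen 0 d]
  unfold pvDiag
  exact (pvInnerEnum m inv (cols : Int) d).symm

-- B's double loop builds exactly the two bucket folds over the cell list
lemma pvFold_eq (cols : Nat) (rows : List (List String)) (s : Int)
    (b1 b2 : PySem.Dict Int (List String)) :
    (PySem.List.enumerate rows s).foldl (fun bf rr =>
      (PySem.List.enumerate (rr.2.take cols)).foldl (fun bf cx =>
        (bf.1.modify (rr.1 + cx.1) [] (· ++ [cx.2]),
         bf.2.modify (rr.1 - cx.1) [] (· ++ [cx.2]))) bf) (b1, b2) =
    ((pvCells cols rows s).foldl (fun d t => d.modify (pvKey (· + ·) t) [] (· ++ [t.2.2])) b1,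
     (pvCells cols rows s).foldl (fun d t => d.modify (pvKey (· - ·) t) [] (· ++ [t.2.2])) b2) := by
  induction rows generalizing s b1 b2 with
  | nil => rw [PySem.List.enumerate_nil, pvCellsNil]; rfl
  | cons row rows ih =>
    rw [PySem.List.enumerate_cons, List.foldl_cons]
    have hin : (PySem.List.enumerate ((s, row).2.take cols)).foldl (fun bf cx =>
          (bf.1.modify ((s, row).1 + cx.1) [] (· ++ [cx.2]),
           bf.2.modify ((s, row).1 - cx.1) [] (· ++ [cx.2]))) (b1, b2) =
        (((PySem.List.enumerate (row.take cols)).map (fun cx => ((s : Int), cx))).foldl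
            (fun d t => d.modify (pvKey (· + ·) t) [] (· ++ [t.2.2])) b1,
         ((PySem.List.enumerate (row.take cols)).map (fun cx => ((s : Int), cx))).foldl
            (fun d t => d.modify (pvKey (· - ·) t) [] (· ++ [t.2.2])) b2) := by
      show (PySem.List.enumerate (row.take cols)).foldl (fun bf cx =>
          (bf.1.modify (s + cx.1) [] (· ++ [cx.2]),
           bf.2.modify (s - cx.1) [] (· ++ [cx.2]))) (b1, b2) = _
      rw [PySem.List.foldl_prod_mk
            (f := fun (d : PySem.Dict Int (List String)) (cx : Int × String) =>
              d.modify (s + cx.1) [] (· ++ [cx.2]))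
            (g := fun (d : PySem.Dict Int (List String)) (cx : Int × String) =>
              d.modify (s - cx.1) [] (· ++ [cx.2]))]
      rw [List.foldl_map, List.foldl_map]
      rfl
    rw [hin, ih, pvCellsCons, List.foldl_append, List.foldl_append]

-- the final bucket of diagonal q, read back from the dictionary
lemma pvGetD_fold (k : Int → Int → Int) (cells : List (Int × Int × String)) (q : Int) :
    (cells.foldl (fun d t => d.modify (pvKey k t) [] (· ++ [t.2.2])) PySem.Dict.empty).getD q [] =
    (cells.filter (fun t => pvKey k t == q)).map (fun t => t.2.2) := by
  have h1 : cells.foldl (fun d t => d.modify (pvKey k t) [] (· ++ [t.2.2])) PySem.Dict.empty =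
      (cells.map (fun t => (pvKey k t, t.2.2))).foldl
        (fun d p => d.modify p.1 [] (· ++ [p.2])) PySem.Dict.empty := by
    rw [List.foldl_map]
  rw [h1, PySem.Dict.getD_foldl_modify_append, PySem.Dict.getD_empty, List.nil_append,
      List.filter_map, List.map_map]
  rfl

-- B unfolded: sorted distinct keys, each mapped to the join of its bucket
lemma pvAltEq (m : List (List String)) :
    extract_diagonals_alt m =
      (PySem.List.sorted (PySem.Set.ofList
          ((pvCells (PySem.List.pyGetD m 0 []).length m 0).map (pvKey (· + ·)))) (fun d => d)).map
        (fun q => PySem.Str.join ""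
          (((pvCells (PySem.List.pyGetD m 0 []).length m 0).filter
              (fun t => pvKey (· + ·) t == q)).map (fun t => t.2.2))) ++
      (PySem.List.sorted (PySem.Set.ofList
          ((pvCells (PySem.List.pyGetD m 0 []).length m 0).map (pvKey (· - ·)))) (fun d => d)).map
        (fun q => PySem.Str.join ""
          (((pvCells (PySem.List.pyGetD m 0 []).length m 0).filter
              (fun t => pvKey (· - ·) t == q)).map (fun t => t.2.2))) := by
  unfold extract_diagonals_alt
  simp only [PySem.List.slice_to_natCast]
  rw [pvFold_eq]
  simp only [PySem.Dict.keys_foldl_modify_key, PySem.Dict.keys_empty, PySem.Set.update_nil_left,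
    pvGetD_fold]

-- A unfolded: for each diagonal index, the inner scan filtered on nonemptiness
lemma pvAEq (m : List (List String)) :
    extract_diagonals m =
      ((PySem.List.pyRange 0 ((m.length : Int) + ((PySem.List.pyGetD m 0 []).length : Int) - 1) 1).filter
          (fun d => decide (pvDiag m (PySem.List.pyGetD m 0 []).length (fun q r => q - r) d ≠ []))).map
        (fun d => PySem.Str.join "" (pvDiag m (PySem.List.pyGetD m 0 []).length (fun q r => q - r) d)) ++
      ((PySem.List.pyRange (-((PySem.List.pyGetD m 0 []).length : Int) + 1) (m.length : Int) 1).filter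
          (fun d => decide (pvDiag m (PySem.List.pyGetD m 0 []).length (fun q r => r - q) d ≠ []))).map
        (fun d => PySem.Str.join "" (pvDiag m (PySem.List.pyGetD m 0 []).length (fun q r => r - q) d)) := by
  unfold extract_diagonals
  simp only [PySem.List.foldl_append_ite, List.nil_append]
  rfl

-- a bucket is nonempty exactly when its key occurs among the cell keys
lemma pvBucketNe (k : Int → Int → Int) (cells : List (Int × Int × String)) (q : Int) :
    (((cells.filter (fun t => pvKey k t == q)).map (fun t => t.2.2)) ≠ []) ↔
      q ∈ cells.map (pvKey k) := by
  constructor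
  · intro h
    have h2 : cells.filter (fun t => pvKey k t == q) ≠ [] := fun hh => h (by rw [hh]; rfl)
    obtain ⟨t, ht⟩ := List.exists_mem_of_ne_nil _ h2
    have hm := List.mem_filter.mp ht
    exact List.mem_map.mpr ⟨t, hm.1, by simpa using hm.2⟩
  · intro h hnil
    obtain ⟨t, htc, htq⟩ := List.mem_map.mp h
    rw [List.map_eq_nil_iff, List.filter_eq_nil_iff] at hnil
    exact hnil t htc (by simp [htq])

-- which keys occur among the cells
lemma pvMemKeys (k : Int → Int → Int) (cols : Nat) (m : List (List String))
    (hlen : ∀ row ∈ m, cols ≤ row.length) (q : Int) :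
    q ∈ (pvCells cols m 0).map (pvKey k) ↔
      ∃ r : Nat, r < m.length ∧ ∃ c : Nat, c < cols ∧ k ((0 : Int) + (r : Int)) ((0 : Int) + (c : Int)) = q := by
  rw [List.mem_map]
  unfold pvCells
  constructor
  · rintro ⟨t, ht, rfl⟩
    rw [List.mem_flatMap] at ht
    obtain ⟨rr, hrr, ht⟩ := ht
    rw [PySem.List.mem_enumerate_iff] at hrr
    obtain ⟨r, hr, rfl⟩ := hrr
    rw [List.mem_map] at ht
    obtain ⟨cx, hcx, rfl⟩ := ht
    rw [PySem.List.mem_enumerate_iff] at hcx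
    obtain ⟨c, hc, rfl⟩ := hcx
    refine ⟨r, hr, c, ?_, rfl⟩
    have := hlen (m[r]) (List.getElem_mem hr)
    simp only [List.length_take] at hc
    omega
  · rintro ⟨r, hr, c, hc, hq⟩
    have hcl : c < (m[r].take cols).length := by
      have := hlen (m[r]) (List.getElem_mem hr)
      simp only [List.length_take]
      omega
    refine ⟨((0 : Int) + (r : Int), ((0 : Int) + (c : Int), (m[r].take cols)[c])), ?_, hq⟩
    rw [List.mem_flatMap]
    refine ⟨((0 : Int) + (r : Int), m[r]), ?_, ?_⟩
    · rw [PySem.List.mem_enumerate_iff]; exact ⟨r, hr, rfl⟩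
    · rw [List.mem_map]
      refine ⟨((0 : Int) + (c : Int), (m[r].take cols)[c]), ?_, rfl⟩
      rw [PySem.List.mem_enumerate_iff]; exact ⟨c, hcl, rfl⟩

-- the "\" keys are exactly 0 .. rows+cols-2
lemma pvArithB (R C : Nat) (hR : 1 ≤ R) (hC : 1 ≤ C) (q : Int) :
    (∃ r : Nat, r < R ∧ ∃ c : Nat, c < C ∧ (0 : Int) + (r : Int) + ((0 : Int) + (c : Int)) = q) ↔
      (0 : Int) ≤ q ∧ q < (R : Int) + (C : Int) - 1 := by
  constructor
  · rintro ⟨r, hr, c, hc, rfl⟩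
    constructor <;> omega
  · rintro ⟨h0, h1⟩
    exact ⟨min q.toNat (R - 1), by omega, q.toNat - min q.toNat (R - 1), by omega, by omega⟩

-- the "/" keys are exactly -(cols-1) .. rows-1
lemma pvArithF (R C : Nat) (hR : 1 ≤ R) (hC : 1 ≤ C) (q : Int) :
    (∃ r : Nat, r < R ∧ ∃ c : Nat, c < C ∧ (0 : Int) + (r : Int) - ((0 : Int) + (c : Int)) = q) ↔
      -(C : Int) + 1 ≤ q ∧ q < (R : Int) := by
  constructor
  · rintro ⟨r, hr, c, hc, rfl⟩
    constructor <;> omega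
  · rintro ⟨h0, h1⟩
    exact ⟨q.toNat, by omega, ((q.toNat : Int) - q).toNat, by omega, by omega⟩

-- per direction: A's filtered diagonal range equals B's sorted key list, mapped the same way
lemma pvSide (k : Int → Int → Int) (cols : Nat) (m : List (List String)) (lo hi : Int)
    (hlen : ∀ row ∈ m, cols ≤ row.length)
    (hrange : ∀ q : Int,
      (∃ r : Nat, r < m.length ∧ ∃ c : Nat, c < cols ∧ k ((0 : Int) + (r : Int)) ((0 : Int) + (c : Int)) = q) ↔
        lo ≤ q ∧ q < hi) :
    ((PySem.List.pyRange lo hi 1).filter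
        (fun d => decide ((((pvCells cols m 0).filter (fun t => pvKey k t == d)).map (fun t => t.2.2)) ≠ []))).map
      (fun d => PySem.Str.join "" (((pvCells cols m 0).filter (fun t => pvKey k t == d)).map (fun t => t.2.2))) =
    (PySem.List.sorted (PySem.Set.ofList ((pvCells cols m 0).map (pvKey k))) (fun d => d)).map
      (fun q => PySem.Str.join "" (((pvCells cols m 0).filter (fun t => pvKey k t == q)).map (fun t => t.2.2))) := by
  have hkeys : ∀ q : Int, q ∈ (pvCells cols m 0).map (pvKey k) ↔ (lo ≤ q ∧ q < hi) := by
    intro q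
    rw [← hrange q]
    exact pvMemKeys k cols m hlen q
  have hsort : PySem.List.sorted (PySem.Set.ofList ((pvCells cols m 0).map (pvKey k))) (fun d => d) =
      PySem.List.pyRange lo hi 1 := by
    apply PySem.List.sorted_eq_of_perm_of_pairwise_lt
    · rw [List.perm_ext_iff_of_nodup (PySem.List.nodup_pyRange_one _ _) (PySem.Set.nodup_ofList _)]
      intro a
      rw [PySem.List.mem_pyRange_one, PySem.Set.mem_ofList, hkeys a]
    · exact PySem.List.pairwise_lt_pyRange_one _ _
  have hfilt : (PySem.List.pyRange lo hi 1).filter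
      (fun d => decide ((((pvCells cols m 0).filter (fun t => pvKey k t == d)).map (fun t => t.2.2)) ≠ [])) =
      PySem.List.pyRange lo hi 1 := by
    rw [List.filter_eq_self]
    intro q hq
    simp only [decide_eq_true_eq]
    exact (pvBucketNe k _ q).mpr ((hkeys q).mpr (PySem.List.mem_pyRange_one.mp hq))
  rw [hsort, hfilt]

-- ===== VERDICT (by name: the statement is the Claim_ definition above) =====
theorem extract_diagonals_spec : Claim_equal_extract_diagonals := by
  intro m _dom hpre
  unfold Spec_extract_diagonals
  obtain ⟨hne, hlen⟩ := hpre
  have hhead : PySem.List.pyGetD m 0 [] = m.headD [] := by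
    cases m with
    | nil => exact absurd rfl hne
    | cons h t => simp [PySem.List.pyGetD_zero_cons]
  have hlen' : ∀ row ∈ m, (PySem.List.pyGetD m 0 []).length ≤ row.length := by
    intro row hr
    rw [hhead]
    exact hlen row hr
  have hR : 0 < m.length := by
    cases m with
    | nil => exact absurd rfl hne
    | cons h t => simp
  have hkB : ∀ r c d : Int, (r + c = d) ↔ c = d - r := fun r c d => by omega
  have hkF : ∀ r c d : Int, (r - c = d) ↔ c = r - d := fun r c d => by omega
  rw [pvAEq, pvAltEq]
  simp only [pvDiagEq (· + ·) (fun q r => q - r) hkB (PySem.List.pyGetD m 0 []).length m hlen',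
             pvDiagEq (· - ·) (fun q r => r - q) hkF (PySem.List.pyGetD m 0 []).length m hlen']
  by_cases hc : (PySem.List.pyGetD m 0 []).length = 0
  · have hcell : pvCells (PySem.List.pyGetD m 0 []).length m 0 = [] := by
      rw [hc]
      exact pvCellsZero m 0
    simp [hcell]
  · have hC : 1 ≤ (PySem.List.pyGetD m 0 []).length := by omega
    congr 1
    · exact pvSide (· + ·) (PySem.List.pyGetD m 0 []).length m 0
        ((m.length : Int) + ((PySem.List.pyGetD m 0 []).length : Int) - 1) hlen'
        (pvArithB m.length (PySem.List.pyGetD m 0 []).length hR hC)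
    · exact pvSide (· - ·) (PySem.List.pyGetD m 0 []).length m
        (-((PySem.List.pyGetD m 0 []).length : Int) + 1) (m.length : Int) hlen'
        (pvArithF m.length (PySem.List.pyGetD m 0 []).length hR hC)
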